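-- pv_equiv track=rewrite | github.com/ScarryParrot/LEETCODE | 2480-find-subarrays-with-equal-sum/find-subarrays-with-equal-sum.py | findSubarrays
-- ===== SOURCE A (Python) =====
-- from typing import List
--
-- def findSubarrays(nums: List[int]) -> bool:
--     if len(nums) < 3:
--         return False
--
--     left, right = 0, 1
--     sums = {}
--
--     while right < len(nums):
--         subarray_sum = nums[left] + nums[right]
--         if subarray_sum in sums:
--             return True  # If the sum is already in the dictionary, return True (duplicate found)
--         sums[subarray_sum] = True  # Store the sum in the dictionary
--         left += 1
--         right += 1
--
--     return False  # If no duplicate sum is found, return False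
-- ===== SOURCE B (Python) =====
-- def findSubarrays(nums):
--     sums = sorted(a + b for a, b in zip(nums, nums[1:]))
--     return any(x == y for x, y in zip(sums, sums[1:]))
-- ===== Notes on version B (the rewrite author's own statement) =====
-- stated objective: alternative
-- what changed: Replaces A's incremental hash-dict duplicate detection during an index walk (with an early length guard) by building the full list of adjacent-pair sums, sorting it, and scanning once for equal neighbours.
import Mathlib
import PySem

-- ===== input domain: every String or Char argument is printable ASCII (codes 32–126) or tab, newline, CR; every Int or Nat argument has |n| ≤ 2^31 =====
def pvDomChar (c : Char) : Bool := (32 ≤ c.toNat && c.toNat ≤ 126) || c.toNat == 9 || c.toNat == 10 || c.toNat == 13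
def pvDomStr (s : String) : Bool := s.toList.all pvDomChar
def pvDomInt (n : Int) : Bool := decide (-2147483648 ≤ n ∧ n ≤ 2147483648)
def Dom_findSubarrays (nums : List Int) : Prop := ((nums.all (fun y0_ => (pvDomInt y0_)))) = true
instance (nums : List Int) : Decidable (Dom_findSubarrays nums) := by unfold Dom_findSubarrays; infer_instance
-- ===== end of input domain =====

-- B replaces A's hash-dict duplicate scan by sort-then-adjacent-compare on the pair sums (alternative algorithm, not claimed faster).


-- ===== PORT A =====
-- A's while loop; left/right are the Python loop indices (always 0 ≤ left < right, so
-- pyGetD with default 0 is exact: the indices are always in range when read).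
def findSubarraysLoop (nums : List Int) (left right : Nat) (sums : PySem.Dict Int Bool) : Bool :=
  if _h : right < nums.length then
    let subarray_sum := PySem.List.pyGetD nums (left : Int) 0 + PySem.List.pyGetD nums (right : Int) 0
    if sums.contains subarray_sum then true
    else findSubarraysLoop nums (left + 1) (right + 1) (sums.insert subarray_sum true)
  else false
termination_by nums.length - right

def findSubarrays (nums : List Int) : Bool :=
  if nums.length < 3 then false
  else findSubarraysLoop nums 0 1 PySem.Dict.empty

-- ===== PORT B =====
-- sums = sorted(a + b for a, b in zip(nums, nums[1:]))
-- return any(x == y for x, y in zip(sums, sums[1:]))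
def findSubarrays_alt (nums : List Int) : Bool :=
  let sums := PySem.List.sorted
      ((nums.zip (PySem.List.slice nums (some 1) none)).map (fun p => p.1 + p.2))
      (fun x => x) false
  (sums.zip (PySem.List.slice sums (some 1) none)).any (fun p => p.1 == p.2)

-- ===== PRECONDITION & SPEC =====
def Spec_findSubarrays (nums : List Int) (out : Bool) : Prop := out = findSubarrays_alt nums
instance (nums : List Int) (out : Bool) : Decidable (Spec_findSubarrays nums out) := by unfold Spec_findSubarrays; infer_instance

-- ===== CLAIM (what is proved, stated in full; the proofs are below) =====
def Claim_equal_findSubarrays : Prop := ∀ (nums : List Int), Dom_findSubarrays nums → Spec_findSubarrays nums (findSubarrays nums)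

-- ===== LEMMAS AND PROOFS =====

-- the list of adjacent-pair sums
def pairSums (nums : List Int) : List Int :=
  (nums.zip nums.tail).map (fun p => p.1 + p.2)

-- A's loop, rephrased over the list of still-unvisited pair sums
def dictLoop (d : PySem.Dict Int Bool) : List Int → Bool
  | [] => false
  | x :: xs => if d.contains x then true else dictLoop (d.insert x true) xs

theorem length_pairSums (nums : List Int) : (pairSums nums).length = nums.length - 1 := by
  simp [pairSums]

theorem getElem_pairSums (nums : List Int) (i : Nat) (h : i < (pairSums nums).length) :
    (pairSums nums)[i] = nums.getD i 0 + nums.getD (i + 1) 0 := by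
  have hlen := length_pairSums nums
  have h1 : i < nums.length := by omega
  have h2 : i + 1 < nums.length := by omega
  have h3 : i < nums.tail.length := by simp [List.length_tail]; omega
  simp [pairSums, List.getElem_zip, List.getElem_tail, h1, h2]

theorem loop_eq_dictLoop (nums : List Int) : ∀ (k left : Nat) (d : PySem.Dict Int Bool),
    nums.length - (left + 1) = k →
    findSubarraysLoop nums left (left + 1) d = dictLoop d ((pairSums nums).drop left) := by
  intro k
  induction k with
  | zero =>
    intro left d hk
    rw [findSubarraysLoop]
    have hge : ¬ (left + 1 < nums.length) := by omega
    have hdrop : (pairSums nums).length ≤ left := by rw [length_pairSums]; omega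
    simp only [hge, dite_false, List.drop_eq_nil_of_le hdrop, dictLoop]
  | succ k ih =>
    intro left d hk
    rw [findSubarraysLoop]
    have hlt : left + 1 < nums.length := by omega
    simp only [hlt, dite_true]
    have hp : left < (pairSums nums).length := by rw [length_pairSums]; omega
    rw [List.drop_eq_getElem_cons hp, getElem_pairSums nums left hp, dictLoop]
    simp only [PySem.List.pyGetD_natCast]
    split
    · rfl
    · exact ih (left + 1) _ (by omega)

theorem dictLoop_spec : ∀ (xs : List Int) (d : PySem.Dict Int Bool), d.keys.Nodup →
    (dictLoop d xs = true ↔ ¬ (d.keys ++ xs).Nodup) := by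
  intro xs
  induction xs with
  | nil => intro d hd; simp [dictLoop, hd]
  | cons x xs ih =>
    intro d hd
    rw [dictLoop]
    by_cases hc : d.contains x = true
    · have hx : x ∈ d.keys := (PySem.Dict.contains_iff_mem_keys d x).mp hc
      simp only [hc, if_true, true_iff]
      intro hnd
      rcases List.nodup_append.mp hnd with ⟨-, -, hdisj⟩
      exact hdisj x hx x List.mem_cons_self rfl
    · have hc' : d.contains x = false := by simpa using hc
      have hkeys : (d.insert x true).keys = d.keys ++ [x] :=
        PySem.Dict.keys_insert_of_not_contains d true hc'
      have hnd' : (d.insert x true).keys.Nodup := by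
        rw [hkeys]
        refine List.nodup_append.mpr ⟨hd, List.nodup_singleton x, ?_⟩
        intro a ha b hb
        rcases List.mem_singleton.mp hb with rfl
        exact fun heq => hc ((PySem.Dict.contains_iff_mem_keys d b).mpr (heq ▸ ha))
      simp only [hc', Bool.false_eq_true, if_false]
      rw [ih _ hnd', hkeys, List.append_assoc]
      simp

-- the adjacent-equality scan is the (negated) adjacent-chain of ≠
theorem anyAdj_eq : ∀ (l : List Int),
    ((l.zip l.tail).any (fun p => p.1 == p.2) = false) ↔ l.IsChain (· ≠ ·) := by
  intro l
  induction l with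
  | nil => simp
  | cons x t ih =>
    cases t with
    | nil => simp
    | cons y t' =>
      simp only [List.tail_cons, List.zip_cons_cons, List.any_cons, Bool.or_eq_false_iff,
        beq_eq_false_iff_ne, List.isChain_cons_cons] at *
      rw [ih]

theorem chain_lt_of_le_ne : ∀ (l : List Int), l.IsChain (· ≤ ·) → l.IsChain (· ≠ ·) →
    l.IsChain (· < ·) := by
  intro l
  induction l with
  | nil => intro _ _; exact List.IsChain.nil
  | cons x t ih =>
    cases t with
    | nil => intro _ _; exact List.IsChain.singleton _
    | cons y t' =>
      intro h1 h2
      rw [List.isChain_cons_cons] at h1 h2 ⊢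
      exact ⟨lt_of_le_of_ne h1.1 h2.1, ih h1.2 h2.2⟩

-- B returns true iff the pair-sum list has a duplicate
theorem alt_true_iff (nums : List Int) :
    findSubarrays_alt nums = true ↔ ¬ (pairSums nums).Nodup := by
  have h1 : findSubarrays_alt nums =
      (let s := PySem.List.sorted (pairSums nums) (fun x => x) false
       (s.zip s.tail).any (fun p => p.1 == p.2)) := by
    simp only [findSubarrays_alt, PySem.List.slice_from_one, pairSums]
  rw [h1]
  set s := PySem.List.sorted (pairSums nums) (fun x => x) false with hs
  have hperm : s.Perm (pairSums nums) := PySem.List.sorted_perm (pairSums nums) (fun x => x) false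
  have hsorted : s.Pairwise (· ≤ ·) := by
    have := PySem.List.sorted_pairwise (pairSums nums) (fun x => x)
    simpa using this
  rw [← hperm.nodup_iff]
  constructor
  · intro h hnd
    have hlt : s.Pairwise (· < ·) :=
      (hsorted.and hnd).imp (fun h => lt_of_le_of_ne h.1 h.2)
    have hch : s.IsChain (· ≠ ·) := (hlt.imp (fun h => ne_of_lt h)).isChain
    rw [(anyAdj_eq s).mpr hch] at h
    exact Bool.false_ne_true h
  · intro hnd
    cases hany : (s.zip s.tail).any (fun p => p.1 == p.2) with
    | true => rfl
    | false =>
      exfalso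
      have hch : s.IsChain (· ≠ ·) := (anyAdj_eq s).mp hany
      have hlt : s.IsChain (· < ·) := chain_lt_of_le_ne s hsorted.isChain hch
      exact hnd (hlt.pairwise.imp (fun h => ne_of_lt h))

theorem pairSums_short_nodup (nums : List Int) (h : nums.length < 3) :
    (pairSums nums).Nodup := by
  have hlen : (pairSums nums).length ≤ 1 := by rw [length_pairSums]; omega
  match hps : pairSums nums with
  | [] => exact List.nodup_nil
  | [x] => exact List.nodup_singleton x
  | x :: y :: t => rw [hps] at hlen; simp at hlen

-- ===== VERDICT (by name: the statement is the Claim_ definition above) =====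
theorem findSubarrays_spec : Claim_equal_findSubarrays := by
  intro nums _
  unfold Spec_findSubarrays
  have key : findSubarrays nums = true ↔ findSubarrays_alt nums = true := by
    rw [alt_true_iff]
    unfold findSubarrays
    by_cases h3 : nums.length < 3
    · simp [h3, pairSums_short_nodup nums h3]
    · simp only [h3, if_false]
      rw [show (1 : Nat) = 0 + 1 from rfl,
        loop_eq_dictLoop nums (nums.length - 1) 0 PySem.Dict.empty (by omega),
        List.drop_zero]
      rw [dictLoop_spec _ _ (by simp [PySem.Dict.keys_empty])]
      simp [PySem.Dict.keys_empty]
  cases hA : findSubarrays nums <;> cases hB : findSubarrays_alt nums <;>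
    simp_all
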